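-- pv_equiv track=rewrite | github.com/MoWitek/YOLO | tasks/task2/Aufgabe2cv.py | create_slope
-- ===== SOURCE A (Python) =====
-- def create_slope(size, fill, back):
--     ar = []
--     for n in range(size):
--         a2 = []
--         a2.extend([fill for n in range(n + 1)])
--         a2.extend([back for n in range(size - n - 1)])
--         ar.append(a2)
--
--     return ar
-- ===== SOURCE B (Python) =====
-- def create_slope(size, fill, back):
--     return [[fill if j <= i else back for j in range(size)] for i in range(size)]
-- ===== Notes on version B (the rewrite author's own statement) =====
-- stated objective: idiomatic
-- what changed: Replaces A's two-run row construction (a fill run then a back run concatenated via extend) with a single per-cell comparison j <= i inside one nested comprehension.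
import Mathlib
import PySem

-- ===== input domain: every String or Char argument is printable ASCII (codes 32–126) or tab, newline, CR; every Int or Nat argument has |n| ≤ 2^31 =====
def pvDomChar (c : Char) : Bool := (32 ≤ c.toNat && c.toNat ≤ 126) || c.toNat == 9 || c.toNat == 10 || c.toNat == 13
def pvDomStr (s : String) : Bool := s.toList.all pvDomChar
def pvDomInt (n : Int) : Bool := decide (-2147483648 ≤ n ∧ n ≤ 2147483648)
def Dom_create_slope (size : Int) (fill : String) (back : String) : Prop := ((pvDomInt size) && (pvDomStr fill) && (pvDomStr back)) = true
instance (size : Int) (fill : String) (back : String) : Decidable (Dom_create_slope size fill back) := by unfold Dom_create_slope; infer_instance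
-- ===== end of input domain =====

-- B builds each row with one per-cell comparison (j ≤ i) instead of A's two concatenated runs; same cost, more idiomatic.


-- ===== PORT A =====
-- for n in range(size): a2 = [fill]*(n+1) via comprehension, then [back]*(size-n-1); ar.append(a2)
def create_slope (size : Int) (fill : String) (back : String) : List (List String) :=
  (PySem.List.pyRange 0 size 1).foldl
    (fun ar n =>
      let a2 : List String := []
      let a2 := a2 ++ (PySem.List.pyRange 0 (n + 1) 1).map (fun _ => fill)
      let a2 := a2 ++ (PySem.List.pyRange 0 (size - n - 1) 1).map (fun _ => back)
      ar ++ [a2])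
    []

-- ===== PORT B =====
def create_slope_alt (size : Int) (fill : String) (back : String) : List (List String) :=
  (PySem.List.pyRange 0 size 1).map
    (fun i => (PySem.List.pyRange 0 size 1).map (fun j => if j ≤ i then fill else back))

-- ===== PRECONDITION & SPEC =====
def Spec_create_slope (size : Int) (fill : String) (back : String) (out : List (List String)) : Prop := out = create_slope_alt size fill back
instance (size : Int) (fill : String) (back : String) (out : List (List String)) : Decidable (Spec_create_slope size fill back out) := by unfold Spec_create_slope; infer_instance

-- ===== CLAIM (what is proved, stated in full; the proofs are below) =====
def Claim_equal_create_slope : Prop := ∀ (size : Int) (fill : String) (back : String), Dom_create_slope size fill back → Spec_create_slope size fill back (create_slope size fill back)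

-- ===== LEMMAS AND PROOFS =====

theorem foldl_append_singleton {α β : Type} (f : α → β) (l : List α) (init : List β) :
    l.foldl (fun acc x => acc ++ [f x]) init = init ++ l.map f := by
  induction l generalizing init with
  | nil => simp
  | cons x xs ih => simp [List.foldl, ih]

theorem row_eq (size i : Int) (fill back : String) (hi0 : 0 ≤ i) (hi : i < size) :
    (PySem.List.pyRange 0 (i + 1) 1).map (fun _ => fill) ++
      (PySem.List.pyRange 0 (size - i - 1) 1).map (fun _ => back)
    = (PySem.List.pyRange 0 size 1).map (fun j => if j ≤ i then fill else back) := by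
  rw [PySem.List.pyRange_one_append 0 (i + 1) size (by omega) (by omega), List.map_append]
  congr 1
  · exact (List.map_congr_left (fun j hj => by
      have := (PySem.List.mem_pyRange_one).1 hj
      simp only [if_pos (show j ≤ i by omega)])).symm
  · rw [List.map_congr_left (l := PySem.List.pyRange (i + 1) size 1) (g := fun _ => back)
      (fun j hj => by
        have := (PySem.List.mem_pyRange_one).1 hj
        simp only [if_neg (show ¬ j ≤ i by omega)])]
    rw [show (fun (_ : Int) => back) = Function.const Int back from rfl,
       List.map_const, List.map_const, PySem.List.length_pyRange_one,
       PySem.List.length_pyRange_one]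
    congr 1
    omega

-- ===== VERDICT (by name: the statement is the Claim_ definition above) =====
theorem create_slope_spec : Claim_equal_create_slope := by
  intro size fill back _
  unfold Spec_create_slope create_slope create_slope_alt
  simp only [List.nil_append]
  rw [foldl_append_singleton
    (f := fun n => (PySem.List.pyRange 0 (n + 1) 1).map (fun _ => fill) ++
      (PySem.List.pyRange 0 (size - n - 1) 1).map (fun _ => back)) _ []]
  simp only [List.nil_append]
  exact List.map_congr_left (fun i hi => by
    have h := (PySem.List.mem_pyRange_one).1 hi
    exact row_eq size i fill back h.1 h.2)
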